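-- pv_equiv track=rewrite | github.com/misaroshm/fes-23 | Rostislav/lab_1/main.py | get_palingrams
-- ===== SOURCE A (Python) =====
-- def get_palingrams(content: str):
--     # Розділити текст на окремі слова
--     words = content.split()
--
--     # Створити множину для зберігання унікальних паліндромів
--     palingrams = set()
--
--     # Пройтися по кожному слову
--     for word in words:
--         # Визначити унікальні пари літер
--         pairs = [word[i:j+1] for i in range(len(word)) for j in range(i, len(word))]
--
--         # Перевірити, чи є паліндромом кожна пара літер
--         for pair in pairs:
--             if pair == pair[::-1]:
--                 # Якщо пара літер є паліндромом, додати її до множини паліндромів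
--                 palingrams.add(pair)
--
--     # Повернути множину унікальних паліндромів
--     return palingrams
-- ===== SOURCE B (Python) =====
-- def get_palingrams(content: str):
--     # Sparse bottom-up DP: for each start i keep only the offsets d such that
--     # word[i:i+d+1] is a palindrome, derived from the row for start i+1
--     # (word[i:i+d+1] is a palindrome iff word[i] == word[i+d] and the inner part is).
--     # Each palindromic substring is found in O(1), instead of A's O(n) slice-and-reverse
--     # test on each of the O(n^2) substrings.
--     result = set()
--     for word in content.split():
--         n = len(word)
--         rows = []
--         prev = []  # palindrome offsets for start i+1
--         for i in range(n - 1, -1, -1):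
--             c = word[i]
--             row = [0]
--             if i + 1 < n and word[i + 1] == c:
--                 row.append(1)
--             for d in prev:
--                 j = i + d + 2
--                 if j < n and word[j] == c:
--                     row.append(d + 2)
--             rows.insert(0, row)
--             prev = row
--         for i in range(n):
--             for d in rows[i]:
--                 result.add(word[i:i + d + 1])
--     return result
-- ===== Notes on version B (the rewrite author's own statement) =====
-- stated objective: faster
-- what changed: B replaces A's slice-and-reverse test on each of the O(n^2) substrings by a sparse bottom-up DP that keeps, per start index, only the palindrome end-offsets derived from the next start's list, so work is proportional to the number of palindromic substrings instead of n per substring.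
import Mathlib
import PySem

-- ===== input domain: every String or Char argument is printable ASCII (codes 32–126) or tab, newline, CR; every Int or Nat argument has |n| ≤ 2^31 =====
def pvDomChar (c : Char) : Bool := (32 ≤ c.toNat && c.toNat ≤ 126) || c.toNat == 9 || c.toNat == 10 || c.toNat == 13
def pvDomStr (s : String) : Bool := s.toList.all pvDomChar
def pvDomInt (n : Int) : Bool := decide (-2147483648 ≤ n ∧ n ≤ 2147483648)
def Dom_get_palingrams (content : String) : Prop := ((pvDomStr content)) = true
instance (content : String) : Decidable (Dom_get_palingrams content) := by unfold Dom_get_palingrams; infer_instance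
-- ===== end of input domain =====

-- B replaces A's slice-and-reverse test on every substring by a sparse bottom-up DP
-- (per start index, the list of palindrome end-offsets, derived from the next start's list);
-- objective: faster (a timing run measured B ahead at every generated size).

-- ===== PORT A =====
-- A: for each word, list all substrings word[i:j+1], keep those equal to their reverse, in a set.
def get_palingrams (content : String) : List String :=
  (PySem.Str.split₀ content).foldl
    (fun palingrams w =>
      let n : Int := PySem.Str.len w
      let pairs : List String :=
        (PySem.List.pyRange 0 n).flatMap (fun i =>
          (PySem.List.pyRange i n).map (fun j =>
            PySem.Str.slice w (some i) (some (j + 1))))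
      pairs.foldl
        (fun palingrams pair =>
          if some pair == PySem.Str.slice? pair none none (-1) then
            PySem.Set.add palingrams pair
          else palingrams)
        palingrams)
    PySem.Set.empty

-- ===== PORT B =====
-- Source B's first loop per word: for i = n-1 .. 0 build the list of offsets d with
-- word[i:i+d+1] a palindrome (row = [0], maybe 1, then d+2 for surviving d of the previous
-- row), prepending each row to 'rows' (rows.insert(0, row)) and keeping it as 'prev'.
def pvRowsB (w : String) : List (List Int) :=
  ((PySem.List.pyRange (PySem.Str.len w - 1) (-1) (-1)).foldl
    (fun (acc : List (List Int) × List Int) i =>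
      let c := PySem.Str.pyGet? w i
      let row : List Int := acc.2.foldl
        (fun r d =>
          if decide (i + d + 2 < PySem.Str.len w) && (PySem.Str.pyGet? w (i + d + 2) == c) then
            r ++ [d + 2]
          else r)
        ([0] ++ (if decide (i + 1 < PySem.Str.len w) && (PySem.Str.pyGet? w (i + 1) == c) then [1] else []))
      (row :: acc.1, row))
    ([], [])).1

-- Source B's second loop: scan i asc, offsets d in rows[i] asc, add word[i:i+d+1].
def get_palingrams_alt (content : String) : List String :=
  (PySem.Str.split₀ content).foldl
    (fun result w =>
      let n : Int := PySem.Str.len w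
      let rows := pvRowsB w
      (PySem.List.pyRange 0 n).foldl
        (fun result i =>
          ((PySem.List.pyGet? rows i).getD []).foldl
            (fun result d =>
              PySem.Set.add result (PySem.Str.slice w (some i) (some (i + d + 1))))
            result)
        result)
    PySem.Set.empty

-- ===== PRECONDITION & SPEC =====
def Spec_get_palingrams (content : String) (out : List String) : Prop := out = get_palingrams_alt content
instance (content : String) (out : List String) : Decidable (Spec_get_palingrams content out) := by unfold Spec_get_palingrams; infer_instance

-- ===== CLAIM (what is proved, stated in full; the proofs are below) =====
def Claim_equal_get_palingrams : Prop := ∀ (content : String), Dom_get_palingrams content → Spec_get_palingrams content (get_palingrams content)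

-- ===== LEMMAS AND PROOFS =====

-- "word[i:i+d+1] is a palindrome", as A tests it
def palB (cs : List Char) (i d : Nat) : Bool :=
  decide (((cs.drop i).take (d + 1)) = ((cs.drop i).take (d + 1)).reverse)

-- specification of Source B's row for start index i: the palindrome offsets, ascending
def hitsN (cs : List Char) (i : Nat) : List Nat :=
  (List.range (cs.length - i)).filter (fun d => palB cs i d)

def hitsSpec (cs : List Char) (i : Nat) : List Int :=
  (hitsN cs i).map (fun (d : Nat) => (d : Int))

-- the build step of pvRowsB, named so the fold invariant can be stated
def pvStep (w : String) (acc : List (List Int) × List Int) (i : Int) : List (List Int) × List Int :=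
  let c := PySem.Str.pyGet? w i
  let row : List Int := acc.2.foldl
    (fun r d =>
      if decide (i + d + 2 < PySem.Str.len w) && (PySem.Str.pyGet? w (i + d + 2) == c) then
        r ++ [d + 2]
      else r)
    ([0] ++ (if decide (i + 1 < PySem.Str.len w) && (PySem.Str.pyGet? w (i + 1) == c) then [1] else []))
  (row :: acc.1, row)

lemma pyRange_natCast (a b : Nat) :
    PySem.List.pyRange (a : Int) (b : Int) = (List.range (b - a)).map (fun d => ((a + d : Nat) : Int)) := by
  induction hk : b - a generalizing a with
  | zero => rw [PySem.List.pyRange_one_eq_nil (by omega)]; simp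
  | succ k ih =>
    rw [PySem.List.pyRange_one_cons (by omega)]
    have h1 : ((a : Int) + 1) = ((a + 1 : Nat) : Int) := by push_cast; ring
    rw [h1, ih (a+1) (by omega), List.range_succ_eq_map]
    simp [List.map_map, Function.comp_def]
    intro d _; ring

lemma pal_peel (a b : Char) (m : List Char) :
    decide ((a :: (m ++ [b])) = (a :: (m ++ [b])).reverse)
      = (decide (a = b) && decide (m = m.reverse)) := by
  have hrev : (a :: (m ++ [b])).reverse = b :: (m.reverse ++ [a]) := by simp
  rw [Bool.eq_iff_iff]
  simp only [decide_eq_true_iff, Bool.and_eq_true, hrev]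
  constructor
  · intro hEq
    injection hEq with h1 h2
    subst h1
    exact ⟨rfl, List.append_cancel_right h2⟩
  · rintro ⟨h1, h2⟩
    subst h1
    rw [← h2]

lemma take_drop_peel (cs : List Char) (i k : Nat) (h : i + (k + 2) < cs.length) :
    (cs.drop i).take (k + 2 + 1)
      = cs[i]'(by omega) :: (((cs.drop (i+1)).take (k + 1)) ++ [cs[i + (k+2)]'(by omega)]) := by
  rw [List.drop_eq_getElem_cons (by omega), List.take_succ_cons]
  congr 1
  have hlt : k + 1 < (cs.drop (i+1)).length := by simp; omega
  rw [List.take_add_one, List.getElem?_eq_getElem hlt]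
  have hidx : i + 1 + (k + 1) = i + (k + 2) := by omega
  simp [List.getElem_drop, hidx]

lemma palB_zero (cs : List Char) (m : Nat) (h : m < cs.length) : palB cs m 0 = true := by
  have h1 : (cs.drop m).take 1 = [cs[m]'h] := by
    rw [List.drop_eq_getElem_cons h, List.take_succ_cons, List.take_zero]
  simp [palB, h1]

lemma palB_one (cs : List Char) (m : Nat) (h : m + 1 < cs.length) :
    palB cs m 1 = decide (cs[m]'(by omega) = cs[m+1]'h) := by
  have h2 : (cs.drop m).take 2 = [cs[m]'(by omega), cs[m+1]'h] := by
    rw [List.drop_eq_getElem_cons (by omega), List.take_succ_cons,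
        List.drop_eq_getElem_cons h, List.take_succ_cons, List.take_zero]
  rw [palB, h2]
  by_cases hc : cs[m]'(by omega) = cs[m+1]'h
  · simp [hc]
  · simp [hc]

lemma palB_step (cs : List Char) (m d : Nat) (h : m + (d + 2) < cs.length) :
    palB cs m (d + 2) = (decide (cs[m]'(by omega) = cs[m + (d+2)]'h) && palB cs (m+1) d) := by
  rw [palB, take_drop_peel cs m d h, pal_peel, palB]

lemma range_two_split (k : Nat) : List.range (k + 2) = [0, 1] ++ (List.range k).map (fun d => d + 2) := by
  rw [List.range_succ_eq_map, List.range_succ_eq_map]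
  simp [List.map_map, Function.comp_def, Nat.succ_eq_add_one]

lemma getElem?_beq (cs : List Char) (a b : Nat) (ha : a < cs.length) (hb : b < cs.length) :
    (cs[a]? == cs[b]?) = decide (cs[b]'hb = cs[a]'ha) := by
  rw [List.getElem?_eq_getElem ha, List.getElem?_eq_getElem hb]
  rw [Bool.eq_iff_iff]
  simp only [beq_iff_eq, Option.some.injEq, decide_eq_true_eq]
  exact eq_comm

lemma filter_map_cast (p : Int → Bool) (X : List Nat) :
    (X.map (fun (d : Nat) => (d : Int))).filter p = (X.filter (fun d => p ((d : Nat) : Int))).map (fun (d : Nat) => (d : Int)) := by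
  rw [List.filter_map]
  rfl

-- the pure Nat-level structure of hitsN
lemma hitsN_struct (cs : List Char) (m k' : Nat) (hk' : cs.length = m + 2 + k') :
    hitsN cs m = 0 :: ((if palB cs m 1 then [1] else []) ++
      ((List.range k').filter (fun d => palB cs m (d + 2))).map (fun d => d + 2)) := by
  unfold hitsN
  rw [show cs.length - m = k' + 2 from by omega, range_two_split, List.filter_append]
  rw [List.filter_map]
  have h01 : List.filter (fun d => palB cs m d) [0, 1] = 0 :: (if palB cs m 1 then [1] else []) := by
    rw [List.filter_cons, List.filter_cons, List.filter_nil]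
    rw [palB_zero cs m (by omega)]
    by_cases h1 : palB cs m 1
    · rw [h1]; simp
    · rw [Bool.eq_false_iff.mpr h1]; simp
  rw [h01]
  simp only [List.cons_append]
  congr 2

lemma row_eq (w : String) (m : Nat) (hm : m < w.toList.length) :
    (hitsSpec w.toList (m+1)).foldl
      (fun r d => if decide ((m:Int) + d + 2 < PySem.Str.len w) &&
            (PySem.Str.pyGet? w ((m:Int) + d + 2) == PySem.Str.pyGet? w (m:Int)) then r ++ [d + 2] else r)
      ([0] ++ (if decide ((m:Int) + 1 < PySem.Str.len w) &&
            (PySem.Str.pyGet? w ((m:Int) + 1) == PySem.Str.pyGet? w (m:Int)) then [1] else []))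
    = hitsSpec w.toList m := by
  rw [PySem.List.foldl_append_if
        (p := fun d => decide ((m:Int) + d + 2 < PySem.Str.len w) &&
              (PySem.Str.pyGet? w ((m:Int) + d + 2) == PySem.Str.pyGet? w (m:Int)))
        (f := fun d => d + 2)]
  rw [PySem.Str.len_eq]
  set cs := w.toList with hcs
  by_cases hK : m + 1 = cs.length
  · have h1 : hitsSpec cs (m+1) = [] := by
      unfold hitsSpec hitsN
      rw [show cs.length - (m+1) = 0 from by omega]
      rfl
    have hcond : decide ((m:Int) + 1 < (cs.length : Int)) = false := by
      rw [decide_eq_false_iff_not]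
      omega
    have h2 : hitsSpec cs m = [(0:Int)] := by
      unfold hitsSpec hitsN
      rw [show cs.length - m = 1 from by omega]
      rw [show List.range 1 = [0] from rfl, List.filter_cons, palB_zero cs m hm]
      rfl
    rw [h1, hcond, h2]
    simp
  · obtain ⟨k', hk'⟩ : ∃ k', cs.length = m + 2 + k' := ⟨cs.length - m - 2, by omega⟩
    have hm1 : m + 1 < cs.length := by omega
    -- condition at a cast offset, in Nat terms
    have hq : ∀ d : Nat,
        (decide ((m:Int) + (d:Int) + 2 < (cs.length : Int)) &&
          (PySem.Str.pyGet? w ((m:Int) + (d:Int) + 2) == PySem.Str.pyGet? w (m:Int)))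
        = (decide (m + d + 2 < cs.length) && (cs[m+d+2]? == cs[m]?)) := fun d => by
      have e1 : ((m:Int) + (d:Int) + 2) = ((m + d + 2 : Nat) : Int) := by push_cast; ring
      rw [e1, PySem.Str.pyGet?_natCast, PySem.Str.pyGet?_natCast]
      congr 1
      rw [Bool.eq_iff_iff]
      simp only [decide_eq_true_eq]
      push_cast
      omega
    -- left filtered chunk in Nat terms
    have hmap : (hitsSpec cs (m+1)).filter
          (fun d => decide ((m:Int) + d + 2 < (cs.length:Int)) &&
            (PySem.Str.pyGet? w ((m:Int) + d + 2) == PySem.Str.pyGet? w (m:Int)))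
        = ((List.range k').filter (fun d => palB cs m (d + 2))).map (fun (d : Nat) => (d : Int)) := by
      unfold hitsSpec hitsN
      rw [filter_map_cast (p := fun d => decide ((m:Int) + d + 2 < (cs.length:Int)) &&
            (PySem.Str.pyGet? w ((m:Int) + d + 2) == PySem.Str.pyGet? w (m:Int)))
            (X := (List.range (cs.length - (m+1))).filter (fun d => palB cs (m+1) d))]
      congr 1
      rw [List.filter_filter]
      rw [show cs.length - (m+1) = k' + 1 from by omega, List.range_succ, List.filter_append]
      have hlast : List.filter (fun (d : Nat) =>
            (decide ((m:Int) + (d:Int) + 2 < (cs.length:Int)) &&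
              (PySem.Str.pyGet? w ((m:Int) + (d:Int) + 2) == PySem.Str.pyGet? w (m:Int))) &&
            palB cs (m+1) d) [k'] = [] := by
        rw [List.filter_cons, List.filter_nil]
        rw [hq k']
        rw [show decide (m + k' + 2 < cs.length) = false from by
          rw [decide_eq_false_iff_not]; omega]
        simp
      rw [hlast, List.append_nil]
      apply List.filter_congr
      intro d hd
      rw [List.mem_range] at hd
      rw [hq d]
      rw [show decide (m + d + 2 < cs.length) = true from by
        rw [decide_eq_true_eq]; omega]
      rw [getElem?_beq cs (m+d+2) m (by omega) (by omega)]
      rw [palB_step cs m d (by omega)]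
      rw [Bool.true_and]
      simp only [Nat.add_assoc]
    -- assemble
    rw [hmap]
    unfold hitsSpec
    rw [hitsN_struct cs m k' hk', List.map_cons, List.map_append]
    have hcond1 : (decide ((m:Int) + 1 < (cs.length:Int)) &&
          (PySem.Str.pyGet? w ((m:Int) + 1) == PySem.Str.pyGet? w (m:Int)))
        = palB cs m 1 := by
      rw [show ((m:Int) + 1) = ((m+1 : Nat) : Int) from by push_cast; ring]
      rw [PySem.Str.pyGet?_natCast, PySem.Str.pyGet?_natCast]
      rw [show decide (((m+1 : Nat):Int) < (cs.length:Int)) = true from by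
        rw [decide_eq_true_eq]; push_cast; omega]
      rw [Bool.true_and, getElem?_beq cs (m+1) m hm1 (by omega)]
      rw [palB_one cs m hm1]
    rw [hcond1]
    have hif : (if palB cs m 1 then [(1:Int)] else [])
        = (if palB cs m 1 then [(1:Nat)] else []).map (fun (d : Nat) => (d : Int)) := by
      by_cases h1 : palB cs m 1 <;> simp [h1]
    rw [hif]
    have hmm : (((List.range k').filter (fun d => palB cs m (d + 2))).map (fun (d : Nat) => (d : Int))).map (fun d => d + 2)
        = (((List.range k').filter (fun d => palB cs m (d + 2))).map (fun d => d + 2)).map (fun (d : Nat) => (d : Int)) := by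
      rw [List.map_map, List.map_map]
      apply List.map_congr_left
      intro d _
      simp only [Function.comp_apply]
      push_cast
      ring
    rw [hmm]
    simp


lemma condA_eq (s : String) :
    (some s == PySem.Str.slice? s none none (-1)) = decide (s.toList = s.toList.reverse) := by
  rw [PySem.Str.slice?_none_none_neg_one]
  have h1 : (s = String.ofList s.toList.reverse) ↔ (s.toList = s.toList.reverse) := by
    constructor
    · intro h; conv_lhs => rw [h]
      rw [String.toList_ofList]
    · intro h
      have := congrArg String.ofList h
      rwa [String.ofList_toList] at this
  rw [Bool.eq_iff_iff]; simp [h1]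

lemma step_row (w : String) (m : Nat) (hm : m < w.toList.length)
    (rows : List (List Int)) :
    pvStep w (rows, hitsSpec w.toList (m+1)) (m : Int)
      = (hitsSpec w.toList m :: rows, hitsSpec w.toList m) := by
  simp only [pvStep]
  rw [row_eq w m hm]

lemma rowsB_eq (w : String) :
    pvRowsB w = (List.range w.toList.length).map (fun i => hitsSpec w.toList i) := by
  show ((PySem.List.pyRange (PySem.Str.len w - 1) (-1) (-1)).foldl (pvStep w) ([], [])).1 = _
  rw [PySem.Str.len_eq]
  have hrev : PySem.List.pyRange ((w.toList.length : Int) - 1) (-1) (-1)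
      = (PySem.List.pyRange 0 (w.toList.length : Int)).reverse := by
    rw [PySem.List.pyRange_neg_one_eq_reverse]
    norm_num
  rw [hrev]
  have h0 : hitsSpec w.toList w.toList.length = [] := by
    unfold hitsSpec hitsN
    rw [show w.toList.length - w.toList.length = 0 from by omega]
    rfl
  have key : ∀ m, m ≤ w.toList.length →
      (PySem.List.pyRange 0 (m : Int)).reverse.foldl (pvStep w)
        ((List.range' m (w.toList.length - m)).map (fun i => hitsSpec w.toList i), hitsSpec w.toList m)
      = ((List.range' 0 (w.toList.length - 0)).map (fun i => hitsSpec w.toList i), hitsSpec w.toList 0) := by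
    intro m hm
    induction m with
    | zero =>
      rw [show ((0:Nat):Int) = (0:Int) from rfl, PySem.List.pyRange_one_eq_nil (le_refl 0)]
      rfl
    | succ k ih =>
      have hsplit : PySem.List.pyRange 0 ((k+1 : Nat) : Int)
          = PySem.List.pyRange 0 ((k : Nat) : Int) ++ [((k : Nat) : Int)] := by
        have hc : ((k+1 : Nat) : Int) = ((k : Nat) : Int) + 1 := by push_cast; ring
        rw [hc, PySem.List.pyRange_one_succ_right (by positivity)]
      rw [hsplit, List.reverse_append, List.reverse_singleton, List.singleton_append,
          List.foldl_cons]
      rw [step_row w k (by omega)]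
      have hrows : hitsSpec w.toList k :: (List.range' (k+1) (w.toList.length - (k+1))).map (fun i => hitsSpec w.toList i)
          = (List.range' k (w.toList.length - k)).map (fun i => hitsSpec w.toList i) := by
        have hc : w.toList.length - k = (w.toList.length - (k+1)) + 1 := by omega
        rw [hc, List.range'_succ, List.map_cons]
      rw [hrows]
      exact ih (by omega)
  have hfin := key w.toList.length (le_refl _)
  rw [show w.toList.length - w.toList.length = 0 from by omega] at hfin
  simp only [List.range'_zero, List.map_nil, h0] at hfin
  rw [hfin]
  simp [List.range_eq_range']

lemma perWord (w : String) (s : PySem.Set String) :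
    (let n : Int := PySem.Str.len w
     let pairs : List String :=
       (PySem.List.pyRange 0 n).flatMap (fun i =>
         (PySem.List.pyRange i n).map (fun j => PySem.Str.slice w (some i) (some (j + 1))))
     pairs.foldl (fun acc pair =>
       if some pair == PySem.Str.slice? pair none none (-1) then PySem.Set.add acc pair else acc) s)
    =
    (let n : Int := PySem.Str.len w
     let rows := pvRowsB w
     (PySem.List.pyRange 0 n).foldl (fun acc i =>
       ((PySem.List.pyGet? rows i).getD []).foldl (fun acc d =>
         PySem.Set.add acc (PySem.Str.slice w (some i) (some (i + d + 1)))) acc) s) := by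
  dsimp only
  rw [List.foldl_flatMap]
  apply PySem.List.foldl_congr_mem
  intro acc i hi
  rw [List.foldl_map]
  rw [PySem.List.mem_pyRange_one, PySem.Str.len_eq] at hi
  obtain ⟨hi0, hin⟩ := hi
  have hi' : i = ((i.toNat : Nat) : Int) := by omega
  -- B inner: look the row up, reduce it to the Nat-level filtered range
  have hrow : (PySem.List.pyGet? (pvRowsB w) i).getD [] = hitsSpec w.toList i.toNat := by
    rw [rowsB_eq, hi', PySem.List.pyGet?_natCast]
    rw [List.getElem?_map, List.getElem?_range (by omega)]
    simp only [Option.map_some, Option.getD_some, Int.toNat_natCast]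
  rw [hrow]
  unfold hitsSpec
  rw [List.foldl_map]
  -- A inner: index the j-loop by the offset d = j - i
  rw [PySem.Str.len_eq]
  rw [show PySem.List.pyRange i ((w.toList.length : Nat) : Int)
      = (List.range (w.toList.length - i.toNat)).map (fun d => ((i.toNat + d : Nat) : Int)) from by
    conv_lhs => rw [hi']
    exact pyRange_natCast i.toNat w.toList.length]
  rw [List.foldl_map]
  rw [PySem.List.foldl_if_eq_foldl_filter
        (p := fun d : Nat => some (PySem.Str.slice w (some i) (some (((i.toNat + d : Nat) : Int) + 1))) ==
          PySem.Str.slice? (PySem.Str.slice w (some i) (some (((i.toNat + d : Nat) : Int) + 1))) none none (-1))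
        (f := fun acc (d : Nat) => PySem.Set.add acc (PySem.Str.slice w (some i) (some (((i.toNat + d : Nat) : Int) + 1))))]
  -- the two filtered index lists coincide
  rw [show (List.range (w.toList.length - i.toNat)).filter
        (fun d : Nat => some (PySem.Str.slice w (some i) (some (((i.toNat + d : Nat) : Int) + 1))) ==
          PySem.Str.slice? (PySem.Str.slice w (some i) (some (((i.toNat + d : Nat) : Int) + 1))) none none (-1))
      = hitsN w.toList i.toNat from ?_]
  · -- same elements are added
    apply PySem.List.foldl_congr_mem
    intro acc2 d hd
    rw [show ((i.toNat + d : Nat) : Int) + 1 = i + (d : Int) + 1 from by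
      conv_rhs => rw [hi']
      push_cast; ring]
  · -- filter condition = palB
    unfold hitsN
    apply List.filter_congr
    intro d hd
    rw [List.mem_range] at hd
    have hsub : (PySem.Str.slice w (some i) (some (((i.toNat + d : Nat) : Int) + 1))).toList
        = (w.toList.drop i.toNat).take (d + 1) := by
      conv_lhs => rw [hi']
      rw [PySem.Str.toList_slice, PySem.Chars.slice_eq_listSlice]
      simp only [Int.toNat_natCast]
      rw [show (((i.toNat + d : Nat) : Int) + 1) = ((i.toNat : Int) + ((d + 1 : Nat) : Int)) from by push_cast; ring]
      rw [PySem.List.slice_natCast_add]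
    rw [condA_eq, hsub]
    rfl

-- ===== VERDICT (by name: the statement is the Claim_ definition above) =====
theorem get_palingrams_spec : Claim_equal_get_palingrams := by
  intro content _
  unfold Spec_get_palingrams get_palingrams get_palingrams_alt
  exact PySem.List.foldl_congr_mem _ _ _ _ (fun acc w _ => perWord w acc)
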